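-- pv_equiv track=rewrite | github.com/airtnqls/Shapez2-Analytics-tools | shape_analyzer.py | get_edge_pillars
-- ===== SOURCE A (Python) =====
-- def get_edge_pillars(shape: str) -> list[str]:
--     """
--     각 사분면별로 모든 레이어의 조각을 세로로 연결한 4개의 기둥 생성
--
--     Args:
--         shape (str): 콜론으로 구분된 레이어 문자열
--
--     Returns:
--         list[str]: 4개 사분면의 기둥 문자열 리스트
--     """
--     layers = shape.split(":")
--     if not layers:
--         return ["", "", "", ""]
--
--     # 각 사분면별로 모든 층의 문자를 세로로 합침
--     pillars = ["", "", "", ""]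
--
--     for layer in layers:
--         # 각 층이 4글자가 아닌 경우 '-'로 패딩
--         padded_layer = layer.ljust(4, '-')[:4]
--         for i in range(4):
--             pillars[i] += padded_layer[i]
--
--     return pillars
-- ===== SOURCE B (Python) =====
-- def get_edge_pillars(shape: str) -> list[str]:
--     # Single-pass character scanner: no split(), no ljust() -- walk the raw string
--     # once tracking the column position inside the current layer; a ':' (or the end)
--     # pads the remaining columns of the layer with '-'.
--     pillars = ['', '', '', '']
--     pos = 0
--     for ch in shape:
--         if ch == ':':
--             while pos < 4:
--                 pillars[pos] += '-'
--                 pos += 1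
--             pos = 0
--         else:
--             if pos < 4:
--                 pillars[pos] += ch
--             pos += 1
--     while pos < 4:
--         pillars[pos] += '-'
--         pos += 1
--     return pillars
-- ===== Notes on version B (the rewrite author's own statement) =====
-- stated objective: alternative
-- what changed: B is a single-pass character scanner over the raw string - no split() and no per-layer ljust/truncate: it tracks the column position inside the current layer and emits the filler padding for the remaining columns at each layer separator and at the end, so A's intermediate layer list and padded-layer strings are never built.
import Mathlib
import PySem

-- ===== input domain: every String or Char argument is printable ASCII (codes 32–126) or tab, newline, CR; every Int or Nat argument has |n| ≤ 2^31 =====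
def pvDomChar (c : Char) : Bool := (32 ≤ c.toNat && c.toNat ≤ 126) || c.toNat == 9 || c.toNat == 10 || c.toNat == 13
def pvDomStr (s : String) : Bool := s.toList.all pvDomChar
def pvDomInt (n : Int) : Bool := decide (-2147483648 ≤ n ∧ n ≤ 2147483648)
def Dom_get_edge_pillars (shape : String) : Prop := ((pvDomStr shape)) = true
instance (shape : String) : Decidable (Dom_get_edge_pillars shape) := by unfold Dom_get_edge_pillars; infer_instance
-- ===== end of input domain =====

-- B replaces A's split/pad/transpose with one character scan over the raw string
-- (a position counter, emitting filler padding at each layer separator and at the end);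
-- objective: alternative single-pass decomposition, same cost.

-- ===== PORT A =====
-- layer.ljust(4, '-')[:4] — exact: pad on the right with '-' up to length 4, then take 4
def pvLjust4 (l : List Char) : List Char :=
  (l ++ List.replicate (4 - l.length) '-').take 4

def get_edge_pillars (shape : String) : List String :=
  let layers := (PySem.Str.split? shape ":").getD []
  if layers = [] then ["", "", "", ""]
  else
    -- pillars as lists of chars; '+=' on a str is append, String.ofList at the end
    let pillars : List (List Char) := [[], [], [], []]
    let pillars := layers.foldl (fun pillars layer =>
      let padded := pvLjust4 layer.toList
      (PySem.List.pyRange 0 4 1).foldl (fun pillars i =>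
        -- pillars[i] += padded_layer[i]: i ∈ {0,1,2,3} is always in range for both
        -- (pillars and padded have length 4), so Python never raises here
        pillars.set i.toNat (pillars.getD i.toNat [] ++ [padded.getD i.toNat ' '])) pillars) pillars
    pillars.map String.ofList

-- ===== PORT B =====
-- the `while pos < 4: pillars[pos] += '-'; pos += 1` loop of Source B
def pvPad (ps : List (List Char)) (pos : Nat) : List (List Char) :=
  if pos < 4 then pvPad (ps.set pos (ps.getD pos [] ++ ['-'])) (pos + 1) else ps
termination_by 4 - pos

-- the body of Source B's `for ch in shape` loop; state = (pillars, pos)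
def pvStep (st : List (List Char) × Nat) (ch : Char) : List (List Char) × Nat :=
  if ch = ':' then (pvPad st.1 st.2, 0)
  else ((if st.2 < 4 then st.1.set st.2 (st.1.getD st.2 [] ++ [ch]) else st.1), st.2 + 1)

def get_edge_pillars_alt (shape : String) : List String :=
  let st := shape.toList.foldl pvStep ([[], [], [], []], 0)
  (pvPad st.1 st.2).map String.ofList

-- ===== PRECONDITION & SPEC =====
def Spec_get_edge_pillars (shape : String) (out : List String) : Prop := out = get_edge_pillars_alt shape
instance (shape : String) (out : List String) : Decidable (Spec_get_edge_pillars shape out) := by unfold Spec_get_edge_pillars; infer_instance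

-- ===== CLAIM (what is proved, stated in full; the proofs are below) =====
def Claim_equal_get_edge_pillars : Prop := ∀ (shape : String), Dom_get_edge_pillars shape → Spec_get_edge_pillars shape (get_edge_pillars shape)

-- ===== LEMMAS AND PROOFS =====

-- splitOn cs [':'] written as plain structural recursion (cur = reversed current piece)
def pvMySplit (cs : List Char) (cur : List Char) : List (List Char) :=
  match cs with
  | [] => [cur.reverse]
  | c :: rest => if c = ':' then cur.reverse :: pvMySplit rest [] else pvMySplit rest (c :: cur)

-- characters pillar i still receives from B's scan of cs starting at column pos
def pvCol (cs : List Char) (pos : Nat) (i : Nat) : List Char :=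
  match cs with
  | [] => if pos ≤ i then ['-'] else []
  | c :: rest =>
    if c = ':' then (if pos ≤ i then ['-'] else []) ++ pvCol rest 0 i
    else (if pos = i then [c] else []) ++ pvCol rest (pos + 1) i

theorem pvGo_spec (fuel : Nat) : ∀ (l cur : List Char) (acc : List (List Char)),
    l.length < fuel →
    PySem.Chars.splitOn.go [':'] fuel l cur acc = acc.reverse ++ pvMySplit l cur := by
  induction fuel with
  | zero => intro l cur acc h; omega
  | succ f ih =>
    intro l cur acc h
    cases l with
    | nil => simp [PySem.Chars.splitOn.go, pvMySplit]
    | cons c rest =>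
      have hpre : ([':'] : List Char).isPrefixOf (c :: rest) = (':' == c) := by
        simp [List.isPrefixOf]
      by_cases hc : c = ':'
      · subst hc
        simp only [PySem.Chars.splitOn.go, hpre, beq_self_eq_true, if_true]
        rw [show List.drop ([':'] : List Char).length (':' :: rest) = rest from rfl]
        rw [ih rest [] (cur.reverse :: acc) (by simpa using Nat.lt_of_succ_lt_succ h)]
        simp [pvMySplit]
      · simp only [PySem.Chars.splitOn.go, hpre]
        rw [if_neg (by simp [Ne.symm hc])]
        rw [ih rest (c :: cur) acc (by simpa using Nat.lt_of_succ_lt_succ h)]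
        simp [pvMySplit, hc]

theorem pvSplitOn_colon (cs : List Char) :
    PySem.Chars.splitOn cs [':'] = pvMySplit cs [] := by
  unfold PySem.Chars.splitOn
  simpa using pvGo_spec (cs.length + 1) cs [] [] (by omega)

theorem pvMySplit_head (cs : List Char) : ∀ cur, ∃ r t, pvMySplit cs cur = (cur.reverse ++ r) :: t := by
  induction cs with
  | nil => intro cur; exact ⟨[], [], by simp [pvMySplit]⟩
  | cons c rest ih =>
    intro cur
    by_cases hc : c = ':'
    · exact ⟨[], pvMySplit rest [], by simp [pvMySplit, hc]⟩
    · obtain ⟨r, t, h⟩ := ih (c :: cur)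
      exact ⟨c :: r, t, by simp [pvMySplit, hc, h]⟩

theorem pvLjust4_getD (l : List Char) (i : Nat) (hi : i < 4) :
    (pvLjust4 l).getD i ' ' = l.getD i '-' := by
  unfold pvLjust4
  rcases Nat.lt_or_ge i l.length with h | h
  · rw [List.getD_eq_getElem?_getD, List.getD_eq_getElem?_getD]
    rw [List.getElem?_take_of_lt hi, List.getElem?_append_left h]
    simp [List.getElem?_eq_getElem h]
  · rw [List.getD_eq_getElem?_getD, List.getD_eq_getElem?_getD]
    have hlen : l.length < 4 := Nat.lt_of_le_of_lt h hi
    rw [List.getElem?_take_of_lt hi, List.getElem?_append_right h]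
    have : i - l.length < 4 - l.length := by omega
    simp [this, List.getElem?_eq_none_iff.mpr h]

theorem pvPad_quad (p0 p1 p2 p3 : List Char) (pos : Nat) :
    pvPad [p0, p1, p2, p3] pos =
      [p0 ++ (if pos ≤ 0 then ['-'] else []), p1 ++ (if pos ≤ 1 then ['-'] else []),
       p2 ++ (if pos ≤ 2 then ['-'] else []), p3 ++ (if pos ≤ 3 then ['-'] else [])] := by
  match pos with
  | 0 => rw [pvPad]; rw [pvPad]; rw [pvPad]; rw [pvPad]; rw [pvPad]; simp
  | 1 => rw [pvPad]; rw [pvPad]; rw [pvPad]; rw [pvPad]; simp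
  | 2 => rw [pvPad]; rw [pvPad]; rw [pvPad]; simp
  | 3 => rw [pvPad]; rw [pvPad]; simp
  | (n+4) => rw [pvPad]; simp

theorem pvB_main (cs : List Char) : ∀ (pos : Nat) (p0 p1 p2 p3 : List Char),
    pvPad (cs.foldl pvStep ([p0, p1, p2, p3], pos)).1 (cs.foldl pvStep ([p0, p1, p2, p3], pos)).2 =
      [p0 ++ pvCol cs pos 0, p1 ++ pvCol cs pos 1, p2 ++ pvCol cs pos 2, p3 ++ pvCol cs pos 3] := by
  induction cs with
  | nil =>
    intro pos p0 p1 p2 p3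
    simp only [List.foldl_nil, pvCol]
    exact pvPad_quad p0 p1 p2 p3 pos
  | cons c rest ih =>
    intro pos p0 p1 p2 p3
    by_cases hc : c = ':'
    · subst hc
      rw [show ((':' :: rest).foldl pvStep ([p0,p1,p2,p3], pos)) =
          rest.foldl pvStep (pvStep ([p0,p1,p2,p3], pos) ':') from rfl]
      rw [show (pvStep ([p0,p1,p2,p3], pos) ':') = ([p0 ++ (if pos ≤ 0 then ['-'] else []),
          p1 ++ (if pos ≤ 1 then ['-'] else []), p2 ++ (if pos ≤ 2 then ['-'] else []),
          p3 ++ (if pos ≤ 3 then ['-'] else [])], 0) from by simp [pvStep, pvPad_quad]]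
      rw [ih 0]
      simp [pvCol, List.append_assoc]
    · rw [show ((c :: rest).foldl pvStep ([p0,p1,p2,p3], pos)) =
          rest.foldl pvStep (pvStep ([p0,p1,p2,p3], pos) c) from rfl]
      by_cases hp : pos < 4
      · interval_cases pos <;>
          (simp only [pvStep, if_neg hc, if_pos (by omega : (_ : Nat) < 4)]
           simp only [List.set, List.getD, List.getElem?_cons_zero, List.getElem?_cons_succ,
             Option.getD_some]
           rw [ih]
           simp [pvCol, hc, List.append_assoc])
      · simp only [pvStep, if_neg hc, if_neg hp]
        rw [ih]
        have h0 : pos ≠ 0 := by omega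
        have h1 : pos ≠ 1 := by omega
        have h2 : pos ≠ 2 := by omega
        have h3 : pos ≠ 3 := by omega
        simp [pvCol, hc, h0, h1, h2, h3]

theorem pvCol_split (cs : List Char) : ∀ (cur : List Char) (i : Nat), i < 4 →
    pvCol cs cur.length i =
      if cur.length ≤ i then (pvMySplit cs cur).map (fun l => l.getD i '-')
      else ((pvMySplit cs cur).map (fun l => l.getD i '-')).tail := by
  induction cs with
  | nil =>
    intro cur i hi
    simp only [pvCol, pvMySplit, List.map_cons, List.map_nil]
    by_cases h : cur.length ≤ i
    · rw [if_pos h, if_pos h, List.getD_eq_default _ _ (by simpa using h)]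
    · rw [if_neg h, if_neg h]; rfl
  | cons c rest ih =>
    intro cur i hi
    by_cases hc : c = ':'
    · subst hc
      simp only [pvCol, pvMySplit, if_true, List.map_cons]
      have h0 := ih [] i hi
      simp only [List.length_nil, Nat.zero_le, if_pos] at h0
      by_cases h : cur.length ≤ i
      · rw [if_pos h, if_pos h, h0, List.getD_eq_default _ _ (by simpa using h)]; rfl
      · rw [if_neg h, if_neg h, h0]; rfl
    · simp only [pvCol, if_neg hc, pvMySplit]
      have hrec := ih (c :: cur) i hi
      simp only [List.length_cons] at hrec
      by_cases he : cur.length = i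
      · -- pillar i receives c now; first piece of the split has c at index i
        subst he
        rw [if_pos (le_refl _)]
        rw [if_neg (by omega)] at hrec
        rw [hrec]
        obtain ⟨r, t, hh⟩ := pvMySplit_head rest (c :: cur)
        rw [hh]
        simp only [List.map_cons, List.tail_cons, List.reverse_cons]
        have : ((cur.reverse ++ [c]) ++ r).getD cur.length '-' = c := by
          rw [List.getD_eq_getElem?_getD, List.append_assoc, List.getElem?_append_right
            (by simp), List.length_reverse]
          simp
        rw [this]
        simp
      · by_cases h : cur.length ≤ i
        · have hlt : cur.length + 1 ≤ i := by omega
          rw [if_pos h, if_pos hlt] at *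
          rw [hrec]; simp [he]
        · rw [if_neg h, if_neg (by omega)] at *
          rw [hrec]; simp

theorem pvMySplit_ne_nil (cs cur : List Char) : pvMySplit cs cur ≠ [] := by
  obtain ⟨r, t, h⟩ := pvMySplit_head cs cur
  simp [h]

-- A's accumulator loop, characterised: starting from [p0,p1,p2,p3], folding all layers
-- appends column i of the padded table to pillar i.
theorem pvFoldA_char (layers : List String) (p0 p1 p2 p3 : List Char) :
    layers.foldl (fun pillars layer =>
      let padded := pvLjust4 layer.toList
      (PySem.List.pyRange 0 4 1).foldl (fun pillars i =>
        pillars.set i.toNat (pillars.getD i.toNat [] ++ [padded.getD i.toNat ' '])) pillars)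
      [p0, p1, p2, p3]
    = [p0 ++ layers.map (fun l => (pvLjust4 l.toList).getD 0 ' '),
       p1 ++ layers.map (fun l => (pvLjust4 l.toList).getD 1 ' '),
       p2 ++ layers.map (fun l => (pvLjust4 l.toList).getD 2 ' '),
       p3 ++ layers.map (fun l => (pvLjust4 l.toList).getD 3 ' ')] := by
  induction layers generalizing p0 p1 p2 p3 with
  | nil => simp
  | cons l ls ih =>
    show List.foldl _
      [p0 ++ [(pvLjust4 l.toList).getD 0 ' '], p1 ++ [(pvLjust4 l.toList).getD 1 ' '],
       p2 ++ [(pvLjust4 l.toList).getD 2 ' '], p3 ++ [(pvLjust4 l.toList).getD 3 ' ']] ls = _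
    rw [ih]
    simp

-- ===== VERDICT (by name: the statement is the Claim_ definition above) =====
theorem get_edge_pillars_spec : Claim_equal_get_edge_pillars := by
  intro shape _
  unfold Spec_get_edge_pillars
  simp only [get_edge_pillars, get_edge_pillars_alt]
  have hsplit : (PySem.Str.split? shape ":").getD []
      = (pvMySplit shape.toList []).map String.ofList := by
    simp [PySem.Str.split?, PySem.Chars.split?, pvSplitOn_colon,
      show (":" : String).toList = [':'] from rfl]
  rw [hsplit]
  rw [if_neg (by simp [pvMySplit_ne_nil])]
  rw [pvFoldA_char]
  rw [pvB_main shape.toList 0 [] [] [] []]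
  have hcol : ∀ i, i < 4 → pvCol shape.toList 0 i
      = (pvMySplit shape.toList []).map (fun l => l.getD i '-') := by
    intro i hi
    have := pvCol_split shape.toList [] i hi
    simpa using this
  have hmap : ∀ i, i < 4 →
      ((pvMySplit shape.toList []).map String.ofList).map
        (fun l => (pvLjust4 l.toList).getD i ' ')
      = (pvMySplit shape.toList []).map (fun l => l.getD i '-') := by
    intro i hi
    rw [List.map_map]
    apply List.map_congr_left
    intro l _
    simpa [List.getD_eq_getElem?_getD] using pvLjust4_getD ((String.ofList l).toList) i hi
  simp only [List.nil_append]
  rw [hcol 0 (by omega), hcol 1 (by omega), hcol 2 (by omega), hcol 3 (by omega),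
    hmap 0 (by omega), hmap 1 (by omega), hmap 2 (by omega), hmap 3 (by omega)]
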